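-- pv_equiv track=rewrite | github.com/QuocTuanIT87/CuoiKy_NhapMonAI_Nhom_29 | hill-climbing algorithm.py | total_teacher
-- ===== SOURCE A (Python) =====
-- def total_teacher(cd, t, schedule):
--     count = 0
--     teacher = 0
--     mt = [row[:] for row in t]
--     for i in range(len(cd)):
--         for j in range(len(cd[i])):
--             if (cd[i][j] == 1):
--                 teacher = schedule[i][j]
--                 if (t[teacher][j] == 1):
--                     for h in range(len(mt)):
--                         if (mt[h][j] == 1):
--                             if (h == teacher):
--                                 count += 1
--                                 mt[h][j] = 0
--                                 break
--                             elif (h != teacher):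
--                                 mt[h][j] = 0
--                                 break
--                 else:
--                     for k in range(len(mt)):
--                         if (mt[k][j] == 1):
--                             mt[k][j] = 0
--                             break
--     return count
-- ===== SOURCE B (Python) =====
-- def total_teacher(cd, t, schedule):
--     # Per-column stacks of available rows (smallest row on top), built lazily once
--     # per column and consumed with pop(), instead of rescanning a mutated copy of t
--     # from row 0 for every scheduled cell.
--     count = 0
--     cols = {}   # column j -> rows h with t[h][j] == 1, in decreasing order
--     for i, row in enumerate(cd):
--         for j, v in enumerate(row):
--             if v == 1:
--                 teacher = schedule[i][j]
--                 col = cols.get(j)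
--                 if col is None:
--                     col = cols[j] = [h for h in range(len(t) - 1, -1, -1) if t[h][j] == 1]
--                 if col and col.pop() == teacher:
--                     count += 1
--     return count
-- ===== Notes on version B (the rewrite author's own statement) =====
-- stated objective: alternative
-- what changed: Instead of copying t and rescanning the mutated matrix from row 0 for every scheduled cell, B makes one enumerate pass over cd and consumes lazily-built per-column stacks of available rows with pop(), trading the matrix copy/mutation and the inner row rescan for a one-time column extraction per used column.
-- outside the precondition, e.g. on total_teacher([[1]], [[1], []], [[0]]): A returns 1, B raises IndexError
import Mathlib
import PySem

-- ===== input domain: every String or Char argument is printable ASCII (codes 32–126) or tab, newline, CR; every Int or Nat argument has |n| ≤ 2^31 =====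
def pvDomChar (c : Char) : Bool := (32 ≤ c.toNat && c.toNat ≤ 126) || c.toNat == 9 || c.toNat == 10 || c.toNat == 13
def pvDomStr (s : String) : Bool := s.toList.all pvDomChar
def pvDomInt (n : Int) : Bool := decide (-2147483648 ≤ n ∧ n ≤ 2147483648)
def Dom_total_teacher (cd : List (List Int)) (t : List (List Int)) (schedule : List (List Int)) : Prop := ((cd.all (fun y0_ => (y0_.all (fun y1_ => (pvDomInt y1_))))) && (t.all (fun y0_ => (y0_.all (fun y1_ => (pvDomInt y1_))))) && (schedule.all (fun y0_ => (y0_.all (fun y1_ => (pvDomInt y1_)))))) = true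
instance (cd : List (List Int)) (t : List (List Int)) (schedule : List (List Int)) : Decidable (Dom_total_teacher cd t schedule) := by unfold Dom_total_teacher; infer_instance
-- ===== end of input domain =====

-- B replaces A's per-cell top-down rescans of the mutated copy of t by lazily built
-- per-column stacks of available rows consumed with pop() (objective: alternative).

-- ===== PORT A =====
-- m[i][j] for Nat indices produced by range(len(..)) (in range on every admitted input)
def pvGet2 (m : List (List Int)) (i j : Nat) : Int := (m.getD i []).getD j 0
-- t[teacher][j] where teacher is a Python int (may be negative: wraps)
def pvGetT (t : List (List Int)) (teacher : Int) (j : Nat) : Int :=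
  ((PySem.List.pyGet? t teacher).getD []).getD j 0
-- mt[h][j] = 0
def pvSetZero (mt : List (List Int)) (h j : Nat) : List (List Int) :=
  mt.set h ((mt.getD h []).set j 0)

-- the 'for h in range(len(mt))' loop of the then-branch (zero first available, count if h == teacher)
def pvScanCount (mt : List (List Int)) (j : Nat) (teacher : Int) : List Nat → List (List Int) × Int
  | [] => (mt, 0)
  | h :: rest =>
    if pvGet2 mt h j = 1 then
      if (h : Int) = teacher then (pvSetZero mt h j, 1)
      else (pvSetZero mt h j, 0)
    else pvScanCount mt j teacher rest

-- the 'for k in range(len(mt))' loop of the else-branch (zero first available)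
def pvScanZero (mt : List (List Int)) (j : Nat) : List Nat → List (List Int)
  | [] => mt
  | h :: rest => if pvGet2 mt h j = 1 then pvSetZero mt h j else pvScanZero mt j rest

def pvCellA (t schedule : List (List Int)) (i j : Nat) (c : Int)
    (st : Int × List (List Int)) : Int × List (List Int) :=
  if c = 1 then
    let teacher := pvGet2 schedule i j
    if pvGetT t teacher j = 1 then
      let r := pvScanCount st.2 j teacher (List.range st.2.length)
      (st.1 + r.2, r.1)
    else (st.1, pvScanZero st.2 j (List.range st.2.length))
  else st

def pvRowA (t schedule : List (List Int)) (i : Nat) :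
    Nat → List Int → Int × List (List Int) → Int × List (List Int)
  | _, [], st => st
  | j, c :: cs, st => pvRowA t schedule i (j + 1) cs (pvCellA t schedule i j c st)

def pvRowsA (t schedule : List (List Int)) :
    Nat → List (List Int) → Int × List (List Int) → Int × List (List Int)
  | _, [], st => st
  | i, r :: rs, st => pvRowsA t schedule (i + 1) rs (pvRowA t schedule i 0 r st)

def total_teacher (cd : List (List Int)) (t : List (List Int)) (schedule : List (List Int)) : Int :=
  (pvRowsA t schedule 0 cd (0, t.map (fun row => row))).1

-- ===== PORT B =====
-- [h for h in range(len(t) - 1, -1, -1) if t[h][j] == 1]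
-- (range(len(t)-1, -1, -1) is (List.range t.length).reverse, exact)
def pvColB (t : List (List Int)) (j : Nat) : List Int :=
  (((List.range t.length).reverse).filter (fun h => pvGet2 t h j = 1)).map (fun (h : Nat) => (h : Int))

-- 'if col and col.pop() == teacher: count += 1'  (pop() mutates the list held by the dict,
-- so the port re-inserts the popped list under the same key)
def pvPop (cnt : Int) (cols : PySem.Dict Int (List Int)) (col : List Int) (j : Nat)
    (teacher : Int) : Int × PySem.Dict Int (List Int) :=
  match col.getLast? with
  | none => (cnt, cols)
  | some x => ((if x = teacher then cnt + 1 else cnt), cols.insert (j : Int) col.dropLast)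

def pvCellB (t schedule : List (List Int)) (i j : Nat) (c : Int)
    (st : Int × PySem.Dict Int (List Int)) : Int × PySem.Dict Int (List Int) :=
  if c = 1 then
    let teacher := pvGet2 schedule i j
    match st.2.get? (j : Int) with
    | none =>
      let col := pvColB t j
      pvPop st.1 (st.2.insert (j : Int) col) col j teacher
    | some col => pvPop st.1 st.2 col j teacher
  else st

def pvRowB (t schedule : List (List Int)) (i : Nat) :
    Nat → List Int → Int × PySem.Dict Int (List Int) → Int × PySem.Dict Int (List Int)
  | _, [], st => st
  | j, c :: cs, st => pvRowB t schedule i (j + 1) cs (pvCellB t schedule i j c st)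

def pvRowsB (t schedule : List (List Int)) :
    Nat → List (List Int) → Int × PySem.Dict Int (List Int) → Int × PySem.Dict Int (List Int)
  | _, [], st => st
  | i, r :: rs, st => pvRowsB t schedule (i + 1) rs (pvRowB t schedule i 0 r st)

def total_teacher_alt (cd : List (List Int)) (t : List (List Int)) (schedule : List (List Int)) : Int :=
  (pvRowsB t schedule 0 cd (0, PySem.Dict.empty)).1

-- ===== PRECONDITION & SPEC =====
-- decidability helper for the bounded quantifiers of Pre_
def pvBallLT (n : Nat) (P : Nat → Prop) [DecidablePred P] : Decidable (∀ i, i < n → P i) :=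
  Nat.decidableBallLT n (fun i _ => P i)
-- Pre_ excludes the inputs on which the Python A raises IndexError (a schedule access or a
-- teacher index out of range at an active cell) and ragged t matrices whose short rows B's
-- one-time column precomputation reads but A's early-breaking scan may never reach (B raises there).
def Pre_total_teacher (cd : List (List Int)) (t : List (List Int)) (schedule : List (List Int)) : Prop :=
  ∀ i, i < cd.length → ∀ j, j < (cd.getD i []).length → (cd.getD i []).getD j 0 = 1 →
    i < schedule.length ∧ j < (schedule.getD i []).length ∧
    -(t.length : Int) ≤ (schedule.getD i []).getD j 0 ∧
    (schedule.getD i []).getD j 0 < (t.length : Int) ∧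
    ∀ h, h < t.length → j < (t.getD h []).length
instance (cd : List (List Int)) (t : List (List Int)) (schedule : List (List Int)) : Decidable (Pre_total_teacher cd t schedule) := by unfold Pre_total_teacher; exact pvBallLT _ _

def pvWitness_total_teacher : List (List Int) × List (List Int) × List (List Int) :=
  ([[1, 0], [0, 1]], [[1, 1], [1, 0]], [[0, 1], [1, 0]])

def Spec_total_teacher (cd : List (List Int)) (t : List (List Int)) (schedule : List (List Int)) (out : Int) : Prop := out = total_teacher_alt cd t schedule
instance (cd : List (List Int)) (t : List (List Int)) (schedule : List (List Int)) (out : Int) : Decidable (Spec_total_teacher cd t schedule out) := by unfold Spec_total_teacher; infer_instance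

-- ===== CLAIM (what is proved, stated in full; the proofs are below) =====
def Claim_equal_total_teacher : Prop := ∀ (cd : List (List Int)) (t : List (List Int)) (schedule : List (List Int)), Dom_total_teacher cd t schedule → Pre_total_teacher cd t schedule → Spec_total_teacher cd t schedule (total_teacher cd t schedule)

-- ===== LEMMAS AND PROOFS =====

-- the rows (in increasing order) still available in column j at the start: those with t[h][j] == 1
def pvColL (t : List (List Int)) (j : Nat) : List Nat :=
  (List.range t.length).filter (fun h => pvGet2 t h j = 1)

-- invariant tying A's mutated matrix to the per-column consumption counters kf
def InvA (t : List (List Int)) (kf : Nat → Nat) (mt : List (List Int)) : Prop :=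
  mt.length = t.length ∧
  ∀ h j, pvGet2 mt h j = if h ∈ (pvColL t j).take (kf j) then 0 else pvGet2 t h j

-- the list B's dict holds for column j after kf j consumptions: the still-available
-- rows, largest first (smallest on top of the stack)
def colVal (t : List (List Int)) (j k : Nat) : List Int :=
  (((pvColL t j).drop k).map (fun (h : Nat) => (h : Int))).reverse

-- invariant tying B's dictionary to the same counters
def InvB (t : List (List Int)) (kf : Nat → Nat) (cols : PySem.Dict Int (List Int)) : Prop :=
  ∀ j : Nat,
    (cols.get? (j : Int) = none ∧ kf j = 0) ∨
    cols.get? (j : Int) = some (colVal t j (kf j))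

def Sim (t : List (List Int)) (stA : Int × List (List Int))
    (stB : Int × PySem.Dict Int (List Int)) : Prop :=
  stA.1 = stB.1 ∧ ∃ kf : Nat → Nat,
    (∀ j, kf j ≤ (pvColL t j).length) ∧ InvA t kf stA.2 ∧ InvB t kf stB.2

lemma getD_set' {α : Type} (l : List α) (i i' : Nat) (a d : α) :
    (l.set i a).getD i' d = if i' = i ∧ i < l.length then a else l.getD i' d := by
  simp only [List.getD_eq_getElem?_getD, List.getElem?_set]
  split_ifs with h1 h2 h3 h4 <;> simp_all

lemma getD_nil_of_ge (mt : List (List Int)) (h0 : Nat) (h : ¬ h0 < mt.length) :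
    mt.getD h0 [] = [] := by
  rw [List.getD_eq_getElem?_getD, List.getElem?_eq_none (by omega)]; rfl

lemma pvGet2_setZero (mt : List (List Int)) (h0 j h' j' : Nat) :
    pvGet2 (pvSetZero mt h0 j) h' j' = if h' = h0 ∧ j' = j then 0 else pvGet2 mt h' j' := by
  unfold pvGet2 pvSetZero
  rw [getD_set']
  by_cases e1 : h' = h0
  · subst e1
    by_cases e2 : h' < mt.length
    · simp only [e2, and_true, if_true]
      rw [getD_set']
      by_cases e3 : j' = j
      · subst e3
        by_cases e4 : j' < (mt.getD h' []).length
        · simp [e4]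
          have e4' : j' < (mt[h']?.getD []).length := by
            simpa [List.getD_eq_getElem?_getD] using e4
          exact fun h => absurd e4' (by omega)
        · simp only [e4, and_false, if_false, and_self, if_pos rfl]
          rw [List.getD_eq_getElem?_getD, List.getElem?_eq_none (by omega)]
          rfl
      · simp [e3]
    · simp [e2, getD_nil_of_ge mt h' e2]
  · simp [e1]

lemma scanCount_spec (mt : List (List Int)) (j : Nat) (teacher : Int) (hs : List Nat) :
    pvScanCount mt j teacher hs =
      match hs.find? (fun h => decide (pvGet2 mt h j = 1)) with
      | none => (mt, 0)
      | some h0 => (pvSetZero mt h0 j, if (h0 : Int) = teacher then 1 else 0) := by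
  induction hs with
  | nil => simp [pvScanCount]
  | cons h rest ih =>
    by_cases hc : pvGet2 mt h j = 1
    · have hf : List.find? (fun h => decide (pvGet2 mt h j = 1)) (h :: rest) = some h :=
        List.find?_cons_of_pos (by simpa using hc)
      rw [hf]
      by_cases ht : (h : Int) = teacher <;> simp [pvScanCount, hc, ht]
    · have hf : List.find? (fun h => decide (pvGet2 mt h j = 1)) (h :: rest) =
          List.find? (fun h => decide (pvGet2 mt h j = 1)) rest :=
        List.find?_cons_of_neg (by simpa using hc)
      rw [hf, ← ih]
      simp [pvScanCount, hc]

lemma scanZero_spec (mt : List (List Int)) (j : Nat) (hs : List Nat) :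
    pvScanZero mt j hs =
      match hs.find? (fun h => decide (pvGet2 mt h j = 1)) with
      | none => mt
      | some h0 => pvSetZero mt h0 j := by
  induction hs with
  | nil => simp [pvScanZero]
  | cons h rest ih =>
    by_cases hc : pvGet2 mt h j = 1
    · have hf : List.find? (fun h => decide (pvGet2 mt h j = 1)) (h :: rest) = some h :=
        List.find?_cons_of_pos (by simpa using hc)
      rw [hf]
      simp [pvScanZero, hc]
    · have hf : List.find? (fun h => decide (pvGet2 mt h j = 1)) (h :: rest) =
          List.find? (fun h => decide (pvGet2 mt h j = 1)) rest :=
        List.find?_cons_of_neg (by simpa using hc)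
      rw [hf, ← ih]
      simp [pvScanZero, hc]

lemma find?_of_sublist {l S : List Nat} (p : Nat → Bool) (hS : S.Sublist l) (hn : l.Nodup)
    (hp : ∀ a ∈ l, p a = decide (a ∈ S)) : l.find? p = S.head? := by
  induction l generalizing S with
  | nil =>
    have : S = [] := List.sublist_nil.mp hS
    subst this; simp
  | cons a l ih =>
    cases S with
    | nil =>
      have hall : ∀ x ∈ a :: l, p x = false := by
        intro x hx; rw [hp x hx]; simp
      have hnone : List.find? p (a :: l) = none :=
        List.find?_eq_none.mpr fun x hx => by simp [hall x hx]
      simp [hnone]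
    | cons b S' =>
      cases hS with
      | cons _ hS' =>
        have hpa : p a = false := by
          rw [hp a (List.mem_cons_self)]
          simp only [decide_eq_false_iff_not]
          intro hmem
          exact (List.nodup_cons.mp hn).1 (hS'.subset hmem)
        rw [List.find?_cons_of_neg (by simp [hpa])]
        exact ih hS' (List.nodup_cons.mp hn).2 fun x hx => hp x (List.mem_cons_of_mem a hx)
      | cons₂ _ hS' =>
        have hpa : p a = true := by rw [hp a List.mem_cons_self]; simp
        rw [List.find?_cons_of_pos hpa]
        rfl

lemma mem_colL (t : List (List Int)) (j h : Nat) :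
    h ∈ pvColL t j ↔ h < t.length ∧ pvGet2 t h j = 1 := by
  simp [pvColL, List.mem_filter]

lemma nodup_colL (t : List (List Int)) (j : Nat) : (pvColL t j).Nodup :=
  (List.nodup_range).filter _

lemma not_mem_drop_of_mem_take {l : List Nat} (hn : l.Nodup) {a : Nat} {k : Nat}
    (h : a ∈ l.take k) : a ∉ l.drop k := by
  have := hn
  rw [← List.take_append_drop k l] at this
  exact fun hd => (List.disjoint_of_nodup_append this) h hd

lemma pred_iff_mem_drop (t mt : List (List Int)) (kf : Nat → Nat) (j : Nat)
    (hInv : InvA t kf mt) (a : Nat) (ha : a < t.length) :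
    (pvGet2 mt a j = 1) ↔ a ∈ (pvColL t j).drop (kf j) := by
  rw [hInv.2 a j]
  by_cases htk : a ∈ (pvColL t j).take (kf j)
  · simp only [htk, if_pos]
    constructor
    · intro h; exact absurd h (by norm_num)
    · intro hd; exact absurd hd (not_mem_drop_of_mem_take (nodup_colL t j) htk)
  · simp only [htk, if_false]
    have hmem : a ∈ pvColL t j ↔ a ∈ (pvColL t j).take (kf j) ∨ a ∈ (pvColL t j).drop (kf j) := by
      conv_lhs => rw [← List.take_append_drop (kf j) (pvColL t j)]
      exact List.mem_append
    constructor
    · intro h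
      have : a ∈ pvColL t j := (mem_colL t j a).mpr ⟨ha, h⟩
      rcases hmem.mp this with h1 | h2
      · exact absurd h1 htk
      · exact h2
    · intro hd
      exact ((mem_colL t j a).mp (hmem.mpr (Or.inr hd))).2

lemma find?_scan (t mt : List (List Int)) (kf : Nat → Nat) (j : Nat)
    (hInv : InvA t kf mt) :
    (List.range mt.length).find? (fun h => decide (pvGet2 mt h j = 1)) =
      (pvColL t j)[kf j]? := by
  rw [hInv.1, ← List.head?_drop]
  exact find?_of_sublist _
    ((List.drop_sublist _ _).trans List.filter_sublist)
    List.nodup_range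
    (fun a ha => by
      simp only [decide_eq_decide]
      exact pred_iff_mem_drop t mt kf j hInv a (List.mem_range.mp ha))

lemma invA_step (t mt : List (List Int)) (kf : Nat → Nat) (j h0 : Nat)
    (hInv : InvA t kf mt) (hget : (pvColL t j)[kf j]? = some h0) :
    InvA t (Function.update kf j (kf j + 1)) (pvSetZero mt h0 j) := by
  have hk : kf j < (pvColL t j).length := by
    by_contra hge
    rw [List.getElem?_eq_none (by omega)] at hget
    simp at hget
  have htake : (pvColL t j).take (kf j + 1) = (pvColL t j).take (kf j) ++ [h0] := by
    rw [List.take_add_one, hget]; rfl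
  constructor
  · rw [pvSetZero, List.length_set]; exact hInv.1
  · intro h jj
    rw [pvGet2_setZero]
    by_cases hjj : jj = j
    · subst hjj
      rw [Function.update_self, htake]
      by_cases hh : h = h0
      · subst hh
        simp
      · simp [hh, hInv.2]
    · rw [Function.update_of_ne hjj]
      simp [hjj, hInv.2]

lemma intCast_ne (j' j : Nat) (h : j' ≠ j) : ((j' : Int) ≠ (j : Int)) :=
  fun he => h (by exact_mod_cast he)

lemma colB_eq (t : List (List Int)) (j : Nat) : pvColB t j = colVal t j 0 := by
  simp [pvColB, colVal, pvColL, List.filter_reverse, List.map_reverse]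

lemma pop_sim (t schedule : List (List Int)) (i j : Nat) (cntA cntB : Int)
    (mt : List (List Int)) (cols1 : PySem.Dict Int (List Int)) (kf : Nat → Nat)
    (hcnt : cntA = cntB) (hK : ∀ j', kf j' ≤ (pvColL t j').length)
    (hA : InvA t kf mt) (hB1 : InvB t kf cols1)
    (f1 : cols1.get? (j : Int) = some (colVal t j (kf j))) :
    Sim t (pvCellA t schedule i j 1 (cntA, mt))
      (pvPop cntB cols1 (colVal t j (kf j)) j (pvGet2 schedule i j)) := by
  have hfind := find?_scan t mt kf j hA
  by_cases hlt : kf j < (pvColL t j).length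
  · have hgetE : (pvColL t j)[kf j]? = some ((pvColL t j)[kf j]) := List.getElem?_eq_getElem hlt
    rw [hgetE] at hfind
    have hmemh0 : (pvColL t j)[kf j] ∈ pvColL t j := List.getElem_mem _
    obtain ⟨hh0lt, hh0one⟩ := (mem_colL t j _).mp hmemh0
    have hsplit : colVal t j (kf j) =
        colVal t j (kf j + 1) ++ [(((pvColL t j)[kf j] : Nat) : Int)] := by
      rw [colVal, colVal, List.drop_eq_getElem_cons hlt, List.map_cons, List.reverse_cons]
    have hpop : pvPop cntB cols1 (colVal t j (kf j)) j (pvGet2 schedule i j) =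
        ((if (((pvColL t j)[kf j] : Nat) : Int) = pvGet2 schedule i j then cntB + 1 else cntB),
          cols1.insert (j : Int) (colVal t j (kf j + 1))) := by
      rw [hsplit]
      simp [pvPop, List.getLast?_concat, List.dropLast_concat]
    rw [hpop]
    have hInvA' := invA_step t mt kf j _ hA hgetE
    have hK' : ∀ j', Function.update kf j (kf j + 1) j' ≤ (pvColL t j').length := by
      intro j'
      by_cases e : j' = j
      · subst e; rw [Function.update_self]; omega
      · rw [Function.update_of_ne e]; exact hK j'
    have hInvB' : InvB t (Function.update kf j (kf j + 1))
        (cols1.insert (j : Int) (colVal t j (kf j + 1))) := by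
      intro j'
      by_cases e : j' = j
      · subst e
        right
        rw [PySem.Dict.get?_insert_self, Function.update_self]
      · rw [PySem.Dict.get?_insert_of_ne _ _ (intCast_ne j' j e), Function.update_of_ne e]
        exact hB1 j'
    by_cases hT : pvGetT t (pvGet2 schedule i j) j = 1
    · have eA : pvCellA t schedule i j 1 (cntA, mt) =
          (cntA + (if (((pvColL t j)[kf j] : Nat) : Int) = pvGet2 schedule i j then 1 else 0),
            pvSetZero mt ((pvColL t j)[kf j]) j) := by
        simp only [pvCellA, if_true, if_pos hT, scanCount_spec, hfind]
      rw [eA]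
      refine ⟨?_, Function.update kf j (kf j + 1), hK', hInvA', hInvB'⟩
      by_cases hteq : (((pvColL t j)[kf j] : Nat) : Int) = pvGet2 schedule i j <;>
        simp [hteq, hcnt]
    · have hne : (((pvColL t j)[kf j] : Nat) : Int) ≠ pvGet2 schedule i j := by
        intro he
        apply hT
        rw [← he]
        unfold pvGetT
        rw [PySem.List.pyGet?_natCast, List.getElem?_eq_getElem hh0lt]
        have hrow : t.getD ((pvColL t j)[kf j]) [] = t[(pvColL t j)[kf j]] := by
          rw [List.getD_eq_getElem?_getD, List.getElem?_eq_getElem hh0lt]; rfl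
        simp only [Option.getD_some]
        rw [← hrow]
        exact hh0one
      have eA : pvCellA t schedule i j 1 (cntA, mt) =
          (cntA, pvSetZero mt ((pvColL t j)[kf j]) j) := by
        simp only [pvCellA, if_true, if_neg hT, scanZero_spec, hfind]
      rw [eA, if_neg hne]
      exact ⟨hcnt, Function.update kf j (kf j + 1), hK', hInvA', hInvB'⟩
  · have hgetE : (pvColL t j)[kf j]? = none := List.getElem?_eq_none (by omega)
    rw [hgetE] at hfind
    have hnil : colVal t j (kf j) = [] := by
      rw [colVal, List.drop_eq_nil_iff.mpr (by omega)]; rfl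
    have hpop : pvPop cntB cols1 (colVal t j (kf j)) j (pvGet2 schedule i j) = (cntB, cols1) := by
      rw [hnil]; rfl
    rw [hpop]
    by_cases hT : pvGetT t (pvGet2 schedule i j) j = 1
    · have eA : pvCellA t schedule i j 1 (cntA, mt) = (cntA + 0, mt) := by
        simp only [pvCellA, if_true, if_pos hT, scanCount_spec, hfind]
      rw [eA]
      exact ⟨by simpa using hcnt, kf, hK, hA, hB1⟩
    · have eA : pvCellA t schedule i j 1 (cntA, mt) = (cntA, mt) := by
        simp only [pvCellA, if_true, if_neg hT, scanZero_spec, hfind]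
      rw [eA]
      exact ⟨hcnt, kf, hK, hA, hB1⟩

lemma cell_sim (t schedule : List (List Int)) (i j : Nat) (c : Int)
    (stA : Int × List (List Int)) (stB : Int × PySem.Dict Int (List Int))
    (h : Sim t stA stB) :
    Sim t (pvCellA t schedule i j c stA) (pvCellB t schedule i j c stB) := by
  obtain ⟨cntA, mt⟩ := stA
  obtain ⟨cntB, cols⟩ := stB
  obtain ⟨hcnt, kf, hK, hA, hB⟩ := h
  simp only at hcnt
  by_cases hc : c = 1
  · subst hc
    rcases hB j with ⟨hg, hk0⟩ | hg
    · have eB : pvCellB t schedule i j 1 (cntB, cols) =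
          pvPop cntB (cols.insert (j : Int) (pvColB t j)) (pvColB t j) j
            (pvGet2 schedule i j) := by
        simp [pvCellB, hg]
      rw [eB, colB_eq, ← hk0]
      refine pop_sim t schedule i j cntA cntB mt _ kf hcnt hK hA ?_ ?_
      · intro j'
        by_cases e : j' = j
        · subst e
          right
          rw [PySem.Dict.get?_insert_self]
        · rw [PySem.Dict.get?_insert_of_ne _ _ (intCast_ne j' j e)]
          exact hB j'
      · rw [PySem.Dict.get?_insert_self]
    · have eB : pvCellB t schedule i j 1 (cntB, cols) =
          pvPop cntB cols (colVal t j (kf j)) j (pvGet2 schedule i j) := by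
        simp [pvCellB, hg]
      rw [eB]
      exact pop_sim t schedule i j cntA cntB mt cols kf hcnt hK hA hB hg
  · simpa [pvCellA, pvCellB, hc] using ⟨hcnt, kf, hK, hA, hB⟩

lemma sim_init (t : List (List Int)) :
    Sim t (0, t.map (fun row => row)) ((0 : Int), PySem.Dict.empty) := by
  refine ⟨rfl, fun _ => 0, fun j => Nat.zero_le _, ⟨by simp, ?_⟩, ?_⟩
  · intro h j
    simp [List.map_id']
  · intro j
    left
    exact ⟨PySem.Dict.get?_empty _, rfl⟩

lemma row_sim (t schedule : List (List Int)) (i : Nat) (cs : List Int) :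
    ∀ (j : Nat) stA stB, Sim t stA stB →
      Sim t (pvRowA t schedule i j cs stA) (pvRowB t schedule i j cs stB) := by
  induction cs with
  | nil => intro j stA stB h; exact h
  | cons c cs ih =>
    intro j stA stB h
    exact ih (j + 1) _ _ (cell_sim t schedule i j c stA stB h)

lemma rows_sim (t schedule : List (List Int)) (rs : List (List Int)) :
    ∀ (i : Nat) stA stB, Sim t stA stB →
      Sim t (pvRowsA t schedule i rs stA) (pvRowsB t schedule i rs stB) := by
  induction rs with
  | nil => intro i stA stB h; exact h
  | cons r rs ih =>
    intro i stA stB h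
    exact ih (i + 1) _ _ (row_sim t schedule i r 0 stA stB h)

-- ===== VERDICT (by name: the statement is the Claim_ definition above) =====
theorem total_teacher_spec : Claim_equal_total_teacher := by
  intro cd t schedule _ _
  unfold Spec_total_teacher total_teacher total_teacher_alt
  exact (rows_sim t schedule cd 0 _ _ (sim_init t)).1
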